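-- pv_equiv track=rewrite | github.com/KateLibC/MarioIsMissingRando | mim/verify.py | checkSeed
-- ===== SOURCE A (Python) =====
-- def checkSeed(seed):
--     def checkValue(s):
--         s = s.upper()
--         # Seeds must be [0-9A-F] and cannot be '0000' in each place
--         return False not in [x in 'ABCDEF0123456789' for x in s] and s != '0000'
--     seed = seed.split(',')
--     o = len(seed) == 2
--     # If there are two values in the seed
--     if o:
--         o = False not in [len(x) == 4 for x in seed]
--     # If the two values are the correct length
--     if o:
--         o = False not in [checkValue(x) for x in seed]
--     return o
-- ===== SOURCE B (Python) =====
-- _HEX = '0123456789abcdefABCDEF'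
--
-- def checkSeed(seed):
--     # Validate the fixed nine-character seed shape positionally, without splitting.
--     if len(seed) != 9 or seed[4] != ',':
--         return False
--     if any(seed[i] not in _HEX for i in range(9) if i != 4):
--         return False
--     return seed[:4] != '0000' and seed[5:] != '0000'
-- ===== Notes on version B (the rewrite author's own statement) =====
-- stated objective: alternative
-- what changed: B never splits the string: it validates the fixed nine-character shape positionally (a comma exactly in the middle, a hex digit at every other index, and neither four-character half consisting of four zeros), whereas A splits on the comma and stages a flag through three per-part list comprehensions with upper() normalisation.
import Mathlib
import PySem

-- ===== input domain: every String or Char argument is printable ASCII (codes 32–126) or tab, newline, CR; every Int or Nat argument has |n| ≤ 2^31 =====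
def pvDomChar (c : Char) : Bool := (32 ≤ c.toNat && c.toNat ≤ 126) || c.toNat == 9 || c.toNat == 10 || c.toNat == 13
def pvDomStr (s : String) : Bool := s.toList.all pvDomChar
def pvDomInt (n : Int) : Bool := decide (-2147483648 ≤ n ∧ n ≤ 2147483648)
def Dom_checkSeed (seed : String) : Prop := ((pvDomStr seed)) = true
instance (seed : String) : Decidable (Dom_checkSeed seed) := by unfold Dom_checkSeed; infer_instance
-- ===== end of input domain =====

-- B validates the fixed nine-character seed shape positionally (length, middle comma,
-- per-index hex membership, neither half all zeros) instead of A's split + staged flag +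
-- three per-part comprehensions; alternative decomposition, same observable behaviour.

-- ===== PORT A =====
def pvCheckValue (s0 : List Char) : Bool :=
  let s := PySem.Chars.upper s0
  (!((s.map (fun x => PySem.Chars.isIn [x] "ABCDEF0123456789".toList)).contains false))
    && !(s == "0000".toList)

def checkSeed (seed : String) : Bool :=
  let parts := PySem.Chars.splitOn seed.toList ",".toList
  let o := parts.length == 2
  let o := if o then !((parts.map (fun x => x.length == 4)).contains false) else o
  let o := if o then !((parts.map pvCheckValue).contains false) else o
  o

-- ===== PORT B =====
def pvHexChars : List Char := "0123456789abcdefABCDEF".toList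

def checkSeed_alt (seed : String) : Bool :=
  let s := seed.toList
  if s.length ≠ 9 ∨ PySem.List.pyGet? s 4 ≠ some ',' then false
  else if ((PySem.List.pyRange 0 9 1).filter (fun i => i != 4)).any
      (fun i => !(match PySem.List.pyGet? s i with
                  | some c => PySem.Chars.isIn [c] pvHexChars
                  | none => false)) then false
    -- the 'none' branch is unreachable here: the first branch checked s.length = 9
  else !(PySem.List.slice s none (some 4) == "0000".toList)
       && !(PySem.List.slice s (some 5) none == "0000".toList)

-- ===== PRECONDITION & SPEC =====
def Spec_checkSeed (seed : String) (out : Bool) : Prop := out = checkSeed_alt seed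
instance (seed : String) (out : Bool) : Decidable (Spec_checkSeed seed out) := by unfold Spec_checkSeed; infer_instance

-- ===== CLAIM (what is proved, stated in full; the proofs are below) =====
def Claim_equal_checkSeed : Prop := ∀ (seed : String), Dom_checkSeed seed → Spec_checkSeed seed (checkSeed seed)

-- ===== LEMMAS AND PROOFS =====

-- reference splitter: pvSp l = l.split(',') (A's split, in direct structural form)
def pvSp : List Char → List (List Char)
  | [] => [[]]
  | c :: rest => if c = ',' then [] :: pvSp rest else (pvSp rest).modifyHead (c :: ·)

lemma pvSp_ne_nil (l : List Char) : pvSp l ≠ [] := by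
  induction l with
  | nil => simp [pvSp]
  | cons c rest ih =>
    simp only [pvSp]
    split
    · simp
    · cases h : pvSp rest with
      | nil => exact absurd h ih
      | cons a t => simp

lemma pv_go (fuel : Nat) :
    ∀ (l cur : List Char) (acc : List (List Char)), l.length < fuel →
    PySem.Chars.splitOn.go [','] fuel l cur acc
      = acc.reverse ++ (pvSp l).modifyHead (cur.reverse ++ ·) := by
  induction fuel with
  | zero => intro l cur acc h; omega
  | succ fuel ih =>
    intro l cur acc h
    cases l with
    | nil =>
      simp [PySem.Chars.splitOn.go, pvSp]
    | cons c rest =>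
      rw [PySem.Chars.splitOn.go]
      by_cases hc : c = ','
      · subst hc
        have hp : List.isPrefixOf [','] (',' :: rest) = true := by simp [List.isPrefixOf]
        simp only [hp, if_true, List.drop_succ_cons, List.length_nil, List.length_cons,
          List.drop_zero]
        rw [ih rest [] (cur.reverse :: acc) (by simpa using h)]
        simp only [pvSp, if_true, List.reverse_cons, List.reverse_nil, List.nil_append,
          List.modifyHead_cons, List.append_assoc, List.singleton_append, List.cons_append]
        cases hsp : pvSp rest with
        | nil => exact absurd hsp (pvSp_ne_nil rest)
        | cons a t => simp
      · have hp : List.isPrefixOf [','] (c :: rest) = false := by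
          simp [List.isPrefixOf]
          intro hh; exact absurd hh.symm hc
        simp only [hp]
        rw [if_neg (by simp)]
        rw [ih rest (c :: cur) acc (by simpa using h)]
        simp only [pvSp, if_neg hc]
        cases hsp : pvSp rest with
        | nil => exact absurd hsp (pvSp_ne_nil rest)
        | cons a t => simp

lemma pv_splitOn_comma (l : List Char) :
    PySem.Chars.splitOn l [','] = pvSp l := by
  rw [PySem.Chars.splitOn, pv_go (l.length + 1) l [] [] (by omega)]
  cases h : pvSp l with
  | nil => exact absurd h (pvSp_ne_nil l)
  | cons a t => simp

lemma pv_sp_one (l q : List Char) :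
    pvSp l = [q] ↔ (l = q ∧ ',' ∉ q) := by
  induction l generalizing q with
  | nil =>
    simp only [pvSp]
    constructor
    · rintro h; cases h; simp
    · rintro ⟨rfl, _⟩; rfl
  | cons c rest ih =>
    simp only [pvSp]
    by_cases hc : c = ','
    · subst hc
      rw [if_pos rfl]
      constructor
      · intro h
        have := congrArg List.tail h
        simp at this
        exact absurd this (pvSp_ne_nil rest)
      · rintro ⟨rfl, hq⟩; simp at hq
    · rw [if_neg hc]
      constructor
      · intro h
        cases hsp : pvSp rest with
        | nil => exact absurd hsp (pvSp_ne_nil rest)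
        | cons a t =>
          rw [hsp] at h
          simp only [List.modifyHead_cons] at h
          injection h with h1 h2
          subst h2
          obtain ⟨rfl, ha⟩ := (ih a).mp hsp
          exact ⟨h1, by rw [← h1]; simp [ha, eq_comm, hc]⟩
      · rintro ⟨rfl, hq⟩
        simp only [List.mem_cons, not_or] at hq
        rw [(ih rest).mpr ⟨rfl, hq.2⟩]
        simp

lemma pv_sp_two (l p q : List Char) :
    pvSp l = [p, q] ↔ (l = p ++ ',' :: q ∧ ',' ∉ p ∧ ',' ∉ q) := by
  induction l generalizing p with
  | nil =>
    simp only [pvSp]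
    constructor
    · intro h; cases h
    · rintro ⟨h, _⟩; exact absurd h (by simp)
  | cons c rest ih =>
    simp only [pvSp]
    by_cases hc : c = ','
    · subst hc
      rw [if_pos rfl]
      constructor
      · intro h
        injection h with h1 h2
        subst h1
        obtain ⟨rfl, hq⟩ := (pv_sp_one rest q).mp h2
        exact ⟨rfl, by simp, hq⟩
      · rintro ⟨he, hp, hq⟩
        rcases p with _ | ⟨x, p'⟩
        · simp only [List.nil_append] at he
          injection he with _ h2
          rw [(pv_sp_one rest q).mpr ⟨h2, hq⟩]
        · injection he with h1 _
          simp only [List.mem_cons, not_or] at hp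
          exact absurd h1 hp.1
    · rw [if_neg hc]
      constructor
      · intro h
        cases hsp : pvSp rest with
        | nil => exact absurd hsp (pvSp_ne_nil rest)
        | cons a t =>
          rw [hsp] at h
          simp only [List.modifyHead_cons] at h
          injection h with h1 h2
          subst h2
          obtain ⟨rfl, hp', hq⟩ := (ih a).mp hsp
          refine ⟨by rw [← h1]; rfl, ?_, hq⟩
          rw [← h1]
          simp [eq_comm, hc, hp']
      · rintro ⟨he, hp, hq⟩
        rcases p with _ | ⟨x, p'⟩
        · simp only [List.nil_append] at he
          injection he with h1 _
          exact absurd h1 hc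
        · injection he with h1 h2
          subst h1
          simp only [List.mem_cons, not_or] at hp
          rw [(ih p').mpr ⟨h2, hp.2, hq⟩]
          simp

-- character-level facts relating A's upper-cased membership test to B's case-mixed one
lemma pv_char_eq_toNat (c d : Char) : c = d ↔ c.toNat = d.toNat := by
  constructor
  · intro h; rw [h]
  · intro h; exact Char.ext (by simpa [Char.toNat] using UInt32.toNat_inj.mp h)

lemma pv_le_toNat (c d : Char) : (c ≤ d) ↔ c.toNat ≤ d.toNat := Iff.rfl

lemma pv_islower_toNat (c : Char) :
    PySem.Chars.islower c = true ↔ (97 ≤ c.toNat ∧ c.toNat ≤ 122) := by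
  simp [PySem.Chars.islower, pv_le_toNat,
    show ('a' : Char).toNat = 97 from rfl, show ('z' : Char).toNat = 122 from rfl]

lemma pv_upperChar_toNat_low (c : Char) (h : PySem.Chars.islower c = true) :
    (PySem.Chars.upperChar c).toNat = c.toNat - 32 := by
  have h' := (pv_islower_toNat c).mp h
  simp only [PySem.Chars.upperChar, h, if_true, Char.toNat_ofNat]
  rw [if_pos]
  exact Or.inl (by omega)

lemma pv_upperChar_eq_zero (c : Char) :
    (PySem.Chars.upperChar c = '0') ↔ c = '0' := by
  by_cases h : PySem.Chars.islower c = true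
  · have h' := (pv_islower_toNat c).mp h
    rw [pv_char_eq_toNat, pv_char_eq_toNat, pv_upperChar_toNat_low c h,
      show ('0' : Char).toNat = 48 from rfl]
    omega
  · simp [PySem.Chars.upperChar, h]

lemma pv_isIn_singleton (x : Char) (L : List Char) :
    PySem.Chars.isIn [x] L = L.contains x := by
  rw [Bool.eq_iff_iff, PySem.Chars.isIn_iff_infix, List.contains_iff_mem]
  constructor
  · intro h; exact h.subset (by simp)
  · intro h
    obtain ⟨s, t, rfl⟩ := List.append_of_mem h
    exact ⟨s, t, by simp⟩

lemma pv_upperChar_mem (c : Char) :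
    ("ABCDEF0123456789".toList).contains (PySem.Chars.upperChar c)
      = pvHexChars.contains c := by
  rw [Bool.eq_iff_iff, List.contains_iff_mem, List.contains_iff_mem, pvHexChars,
    show "ABCDEF0123456789".toList = ['A','B','C','D','E','F','0','1','2','3','4','5','6','7','8','9'] from rfl,
    show "0123456789abcdefABCDEF".toList = ['0','1','2','3','4','5','6','7','8','9','a','b','c','d','e','f','A','B','C','D','E','F'] from rfl]
  simp only [List.mem_cons, List.not_mem_nil, or_false, pv_char_eq_toNat]
  simp only [show ('0' : Char).toNat = 48 from rfl, show ('1' : Char).toNat = 49 from rfl, show ('2' : Char).toNat = 50 from rfl, show ('3' : Char).toNat = 51 from rfl, show ('4' : Char).toNat = 52 from rfl, show ('5' : Char).toNat = 53 from rfl, show ('6' : Char).toNat = 54 from rfl, show ('7' : Char).toNat = 55 from rfl, show ('8' : Char).toNat = 56 from rfl, show ('9' : Char).toNat = 57 from rfl, show ('A' : Char).toNat = 65 from rfl, show ('B' : Char).toNat = 66 from rfl, show ('C' : Char).toNat = 67 from rfl, show ('D' : Char).toNat = 68 from rfl, show ('E' : Char).toNat = 69 from rfl, show ('F' : Char).toNat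 = 70 from rfl, show ('a' : Char).toNat = 97 from rfl, show ('b' : Char).toNat = 98 from rfl, show ('c' : Char).toNat = 99 from rfl, show ('d' : Char).toNat = 100 from rfl, show ('e' : Char).toNat = 101 from rfl, show ('f' : Char).toNat = 102 from rfl]
  by_cases h : PySem.Chars.islower c = true
  · have h' := (pv_islower_toNat c).mp h
    rw [pv_upperChar_toNat_low c h]
    omega
  · have hc : PySem.Chars.upperChar c = c := by simp [PySem.Chars.upperChar, h]
    have h' : ¬ (97 ≤ c.toNat ∧ c.toNat ≤ 122) := fun hh => h ((pv_islower_toNat c).mpr hh)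
    rw [hc]
    omega

lemma pv_hex_ne_comma (x : Char) (h : x ∈ pvHexChars) : x ≠ ',' := by
  intro heq; subst heq; revert h; decide

lemma pv_cv (a b c d : Char) :
    pvCheckValue [a, b, c, d] = true ↔
      (pvHexChars.contains a = true ∧ pvHexChars.contains b = true ∧
       pvHexChars.contains c = true ∧ pvHexChars.contains d = true ∧
       ¬(a = '0' ∧ b = '0' ∧ c = '0' ∧ d = '0')) := by
  have hmem : ∀ x : Char,
      PySem.Chars.isIn [PySem.Chars.upperChar x] "ABCDEF0123456789".toList
        = pvHexChars.contains x := by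
    intro x; rw [pv_isIn_singleton, pv_upperChar_mem]
  simp only [pvCheckValue, PySem.Chars.upper, List.map_cons, List.map_nil, hmem]
  cases ha : pvHexChars.contains a <;> cases hb : pvHexChars.contains b <;>
    cases hc : pvHexChars.contains c <;> cases hd : pvHexChars.contains d <;>
    simp [List.contains_cons, show "0000".toList = ['0','0','0','0'] from rfl,
      pv_upperChar_eq_zero]
  constructor
  · intro hor h1 h2 h3
    rcases hor with hx | hx | hx | hx
    · exact absurd h1 hx
    · exact absurd h2 hx
    · exact absurd h3 hx
    · exact hx
  · intro him
    by_cases h1 : a = '0'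
    · by_cases h2 : b = '0'
      · by_cases h3 : c = '0'
        · exact Or.inr (Or.inr (Or.inr (him h1 h2 h3)))
        · exact Or.inr (Or.inr (Or.inl h3))
      · exact Or.inr (Or.inl h2)
    · exact Or.inl h1

lemma pv_len_cons {n : Nat} {l : List Char} (h : l.length = n + 1) :
    ∃ a t, l = a :: t ∧ t.length = n := by
  cases l with
  | nil => simp at h
  | cons a t => exact ⟨a, t, rfl, by simpa using h⟩

lemma pv_len4 {l : List Char} (h : l.length = 4) :
    ∃ a b c d, l = [a, b, c, d] := by
  obtain ⟨a, t1, rfl, h1⟩ := pv_len_cons h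
  obtain ⟨b, t2, rfl, h2⟩ := pv_len_cons h1
  obtain ⟨c, t3, rfl, h3⟩ := pv_len_cons h2
  obtain ⟨d, t4, rfl, h4⟩ := pv_len_cons h3
  exact ⟨a, b, c, d, by simp [List.length_eq_zero_iff.mp h4]⟩

-- A, reshaped: split result has two parts, each of length 4, each passing checkValue
lemma pv_A_eq (seed : String) :
    checkSeed seed = ((pvSp seed.toList).length == 2
        && (pvSp seed.toList).all (fun x => x.length == 4)
        && (pvSp seed.toList).all pvCheckValue) := by
  rw [checkSeed]
  rw [show ",".toList = [','] from rfl, pv_splitOn_comma]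
  have hnc : ∀ (f : List Char → Bool) (L : List (List Char)),
      (!((L.map f).contains false)) = L.all f := by
    intro f L
    induction L with
    | nil => rfl
    | cons a L ih => cases hfa : f a <;> simp_all
  simp only [hnc]
  cases h2 : (pvSp seed.toList).length == 2 with
  | false => simp [h2]
  | true =>
    cases hall : (pvSp seed.toList).all (fun x => x.length == 4) with
    | false =>
      simp only [h2, hall, if_true, Bool.false_eq_true, if_false, Bool.true_and,
        Bool.and_false, Bool.false_and]
    | true =>
      simp only [h2, hall, if_true, Bool.true_and]

-- ===== VERDICT (by name: the statement is the Claim_ definition above) =====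
theorem checkSeed_spec : Claim_equal_checkSeed := by
  intro seed _
  unfold Spec_checkSeed
  rw [Bool.eq_iff_iff]
  constructor
  · -- A = true → B = true
    intro hA
    rw [pv_A_eq] at hA
    simp only [Bool.and_eq_true, beq_iff_eq, List.all_eq_true] at hA
    obtain ⟨⟨h2, hlen⟩, hcv⟩ := hA
    obtain ⟨p, q, hpq⟩ := List.length_eq_two.mp h2
    have hp4 : p.length = 4 := by simpa using hlen p (by simp [hpq])
    have hq4 : q.length = 4 := by simpa using hlen q (by simp [hpq])
    have hcvp := hcv p (by simp [hpq])
    have hcvq := hcv q (by simp [hpq])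
    obtain ⟨hl, _, _⟩ := (pv_sp_two seed.toList p q).mp hpq
    obtain ⟨a, b, c, d, rfl⟩ := pv_len4 hp4
    obtain ⟨e, f, g, h, rfl⟩ := pv_len4 hq4
    obtain ⟨ha, hb, hc, hd, hz1⟩ := (pv_cv a b c d).mp hcvp
    obtain ⟨he, hf, hg, hh, hz2⟩ := (pv_cv e f g h).mp hcvq
    rw [checkSeed_alt]
    simp only [hl, List.cons_append, List.nil_append]
    rw [if_neg (by
      simp [PySem.List.pyGet?, PySem.List.pyIdx?])]
    have hmem8 : a ∈ pvHexChars ∧ b ∈ pvHexChars ∧ c ∈ pvHexChars ∧ d ∈ pvHexChars ∧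
        e ∈ pvHexChars ∧ f ∈ pvHexChars ∧ g ∈ pvHexChars ∧ h ∈ pvHexChars := by
      exact ⟨by simpa using ha, by simpa using hb, by simpa using hc, by simpa using hd,
        by simpa using he, by simpa using hf, by simpa using hg, by simpa using hh⟩
    rw [if_neg (by
      rw [show (PySem.List.pyRange 0 9 1).filter (fun i => i != 4) = [0,1,2,3,5,6,7,8] from by decide]
      simp [PySem.List.pyGet?, PySem.List.pyIdx?, pv_isIn_singleton]
      exact hmem8)]
    simp only [PySem.List.slice, Bool.and_eq_true, Bool.not_eq_true', beq_eq_false_iff_ne, ne_eq]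
    constructor
    · intro hcontra
      revert hcontra
      simp [show "0000".toList = ['0','0','0','0'] from rfl]
      intro h1 h2 h3 h4
      exact hz1 ⟨h1, h2, h3, h4⟩
    · intro hcontra
      revert hcontra
      simp [show "0000".toList = ['0','0','0','0'] from rfl]
      intro h1 h2 h3 h4
      exact hz2 ⟨h1, h2, h3, h4⟩
  · -- B = true → A = true
    intro hB
    rw [checkSeed_alt] at hB
    rw [pv_A_eq]
    generalize hgen : seed.toList = l at hB ⊢
    split_ifs at hB with hcond hany
    push_neg at hcond
    obtain ⟨hlen9, hmid⟩ := hcond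
    obtain ⟨a, l1, rfl, hl1⟩ := pv_len_cons (n := 8) hlen9
    obtain ⟨b, l2, rfl, hl2⟩ := pv_len_cons (n := 7) hl1
    obtain ⟨c, l3, rfl, hl3⟩ := pv_len_cons (n := 6) hl2
    obtain ⟨d, l4, rfl, hl4⟩ := pv_len_cons (n := 5) hl3
    obtain ⟨x, l5, rfl, hl5⟩ := pv_len_cons (n := 4) hl4
    obtain ⟨e, f, g, h, rfl⟩ := pv_len4 hl5
    have hx : x = ',' := by
      simpa [PySem.List.pyGet?, PySem.List.pyIdx?] using hmid
    subst hx
    rw [show (PySem.List.pyRange 0 9 1).filter (fun i => i != 4) = [0,1,2,3,5,6,7,8] from by decide] at hany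
    simp only [List.any_eq_true, not_exists, Bool.not_eq_true', Bool.not_eq_false] at hany
    simp [PySem.List.pyGet?, PySem.List.pyIdx?, pv_isIn_singleton] at hany
    obtain ⟨ha, hb, hc, hd, he, hf, hg, hh⟩ := hany
    simp only [PySem.List.slice, Bool.and_eq_true, Bool.not_eq_true', beq_eq_false_iff_ne, ne_eq] at hB
    obtain ⟨hz1, hz2⟩ := hB
    have hsp : pvSp (a :: b :: c :: d :: ',' :: e :: f :: g :: h :: []) = [[a,b,c,d],[e,f,g,h]] := by
      apply (pv_sp_two _ [a,b,c,d] [e,f,g,h]).mpr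
      refine ⟨rfl, ?_, ?_⟩
      · simp only [List.mem_cons, List.not_mem_nil, or_false, not_or]
        exact ⟨fun hh' => pv_hex_ne_comma a ha hh'.symm, fun hh' => pv_hex_ne_comma b hb hh'.symm,
          fun hh' => pv_hex_ne_comma c hc hh'.symm, fun hh' => pv_hex_ne_comma d hd hh'.symm⟩
      · simp only [List.mem_cons, List.not_mem_nil, or_false, not_or]
        exact ⟨fun hh' => pv_hex_ne_comma e he hh'.symm, fun hh' => pv_hex_ne_comma f hf hh'.symm,
          fun hh' => pv_hex_ne_comma g hg hh'.symm, fun hh' => pv_hex_ne_comma h hh hh'.symm⟩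
    rw [hsp]
    simp only [Bool.and_eq_true, List.all_cons, List.all_nil, Bool.and_true, beq_iff_eq]
    refine ⟨⟨rfl, by simp, by simp⟩, ?_, ?_⟩
    · apply (pv_cv a b c d).mpr
      refine ⟨by simpa using ha, by simpa using hb, by simpa using hc, by simpa using hd, ?_⟩
      rintro ⟨rfl, rfl, rfl, rfl⟩
      exact hz1 (by simp [PySem.List.clampIdx])
    · apply (pv_cv e f g h).mpr
      refine ⟨by simpa using he, by simpa using hf, by simpa using hg, by simpa using hh, ?_⟩
      rintro ⟨rfl, rfl, rfl, rfl⟩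
      exact hz2 (by simp [PySem.List.clampIdx])
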